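/- GENERATED by mk_final_copies.py from the proof of the farm's unit `sift_down` (farm:sift_down.1: Lemmas.lean) as the
   re-elaboration sweep compiled it — do not edit. -/
import Asan.CheckWalk
import Vorbis.Spec.Units.sift_down

/-!
  Lemmas of the unit `sift_down`: the arithmetic of indices and record addresses (`k * w + base` on words is the number
  `base + w · k`), the ABI invariant from the walker's `w_flags` / `w_mxcsr` (`abi_of_status`), the MEMORY PART OF THE LOOP
  INVARIANT (`MemInv`) with the one rule that carries it over a call (`MemInv.step`), and the assertion of the extra cut point
  `cmpSite` = 0x101321 inside the loop body (`AtCmp`).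
-/

open X86 X86.User Asan Vorbis

namespace Vorbis.Spec.sift_down

/-- The address 0x101321 (libc.c:80, `mov rbp, r12`): where the three paths that have chosen `child` meet, just before the
arguments of `cmp(base + root * width, base + child * width)` are computed. A cut point of this proof. -/
abbrev cmpSite : Word := 0x101321

/-! ### Indices and record addresses -/

/-- `lea r12, [rbx + rbx + 1]`: the index `2·i + 1`, as a word. -/
theorem ofNat_child1 (i : Nat) : UInt64.ofNat i + UInt64.ofNat i + 1 = UInt64.ofNat (2 * i + 1) := by
  rw [show 2 * i + 1 = i + i + 1 by omega, UInt64.ofNat_add, UInt64.ofNat_add]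
  rfl

/-- `lea rax, [rbx + 1] ; lea rbp, [rax + rax]`: the index `2·i + 2`, as a word. -/
theorem ofNat_child2 (i : Nat) : UInt64.ofNat i + 1 + (UInt64.ofNat i + 1) = UInt64.ofNat (2 * i + 2) := by
  rw [show 2 * i + 2 = (i + 1) + (i + 1) by omega, UInt64.ofNat_add, UInt64.ofNat_add]
  rfl

/-- `imul rax, r13 ; lea rsi, [r14 + rax * 2]` computes the address of record `2·i + 2` in the usual form `k * w + base`. -/
theorem addr_child2 (base wW : Word) (i : Nat) :
    base + (UInt64.ofNat i + 1) * wW * 2 = UInt64.ofNat (2 * i + 2) * wW + base := by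
  rw [← ofNat_child2]
  grind

/-- The number of records is below 2^63 (`w · n < 2^63`, `w ≥ 1`): no index computation `2·i + 2`, `i ≤ n`, wraps. -/
theorem count_lt {w n : Nat} (hw : 0 < w) (h : w * n < 2 ^ 63) : n < 2 ^ 63 := by
  have h1 : n ≤ w * n := Nat.le_mul_of_pos_left n hw
  omega

/-- `cmp r12, r15 ; jae` not taken at 0x10135c: `child = 2·i + 1 < end`, as numbers. -/
theorem child1_lt {i n : Nat} (hi : i ≤ n) (hn : n < 2 ^ 63)
    (h : (UInt64.ofNat i + UInt64.ofNat i + 1).toNat < n) : 2 * i + 1 < n := by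
  have e : (UInt64.ofNat (2 * i + 1)).toNat = 2 * i + 1 := Code.toNat_ofNat_lt _ (by omega)
  rw [ofNat_child1, e] at h
  exact h

/-- `cmp rbp, r15 ; jae` not taken at 0x101369: `child + 1 = 2·i + 2 < end`, as numbers. -/
theorem child2_lt {i n : Nat} (hi : 2 * i + 1 < n) (hn : n < 2 ^ 63)
    (h : (UInt64.ofNat i + 1 + (UInt64.ofNat i + 1)).toNat < n) : 2 * i + 2 < n := by
  have e : (UInt64.ofNat (2 * i + 2)).toNat = 2 * i + 2 := Code.toNat_ofNat_lt _ (by omega)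
  rw [ofNat_child2, e] at h
  exact h

/-- Record `k < n` ends inside the array of `n` records. -/
theorem record_inside {w n k : Nat} (hk : k < n) : w * k + w ≤ w * n := by
  have h1 : w * (k + 1) ≤ w * n := Nat.mul_le_mul_left w hk
  rw [Nat.mul_succ] at h1
  exact h1

/-- **The address of record `k`** as the code computes it from the index `k` (a number below `n`): `base + w · k`. -/
theorem record_addr (base wW : Word) {w n k : Nat} (hw : wW.toNat = w) (hk : k < n) (hn : n < 2 ^ 64)
    (hlt : base.toNat + w * n < 2 ^ 64) : (UInt64.ofNat k * wW + base).toNat = base.toNat + w * k := by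
  have hk' : (UInt64.ofNat k).toNat = k := Code.toNat_ofNat_lt _ (by omega)
  have h := RecordsKept.toNat_record_addr base (UInt64.ofNat k) wW (n := n) hw (by rw [hk']; exact hk) hlt
  rw [hk'] at h
  exact h

/-- A record of a live array is live. -/
theorem live_record {others : List Obj} {frames : List (Nat × FrameLayout)} {base w n k a : Nat}
    (hlive : LiveIn others frames base (w * n)) (hk : k < n) (ha : a = base + w * k) : LiveIn others frames a w := by
  have h1 := record_inside (w := w) hk
  exact hlive.sub a w (by omega) (by omega)

/-! ### The ABI invariant along the walk -/

/-- DF after instructions that wrote status flags only (the walker's `w_flags : s.flags = f.setStatus st`). -/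
theorem df_of_status {s : State} {f : Flags} {st : StatusFlags} (hf : s.flags = f.setStatus st)
    (hdf : f .df = false) : s.flags .df = false := by
  rw [hf, X86.User.df_setStatus]
  exact hdf

/-- The MXCSR masks of a state whose MXCSR is that of an earlier state (the walker's `w_mxcsr : s.mxcsr = m`). -/
theorem mx_of_eq {s : State} {m : Word} (hm : s.mxcsr = m) (hmx : m &&& 0x1F80 = 0x1F80) :
    s.mxcsr &&& 0x1F80 = 0x1F80 := by
  rw [hm]
  exact hmx

/-- **The ABI invariant** (`call_inv` of a callee's `AtEntry`, `inv` of `Returned`) from the walker's `w_flags`, `w_mxcsr` and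
what is known of the state below. (`v_inv` does the same by `assumption`, which takes over a minute in this unit's context.) -/
theorem abi_of_status {s : State} {f : Flags} {st : StatusFlags} {m : Word} (hf : s.flags = f.setStatus st)
    (hdf : f .df = false) (hm : s.mxcsr = m) (hmx : m &&& 0x1F80 = 0x1F80) : abiInv s :=
  Vorbis.abiInv_of (df_of_status hf hdf) (mx_of_eq hm hmx)

/-! ### The memory part of the loop invariant -/

/-- **What the loop invariant of `sift_down` says of the memory** `m` (at the loop head, and after each of the three calls),
against the entry state `u`: only the function's stack and the array were written, no shadow byte was, every record is one of
the input's, and the eight stack slots the code reads back hold what was pushed / spilled there (`[rsp − 64]`: `cmp`). -/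
structure MemInv (u : State) (ret cmp : Word) (w : Nat) (m : Mem) : Prop where
  same : Mem.SameExcept [⟨(u.reg .rsp).toNat - 176, (u.reg .rsp).toNat⟩,
    ⟨(u.reg .rdi).toNat, (u.reg .rdi).toNat + w * (u.reg .rdx).toNat⟩] u.mem m
  un : ShadowUntouched u.mem m
  rk : RecordsKept u.mem m (u.reg .rdi).toNat w (u.reg .rdx).toNat
  s0 : UInt64.ofNat (m.readLE (u.reg .rsp) 8) = ret
  s1 : UInt64.ofNat (m.readLE (u.reg .rsp - 8) 8) = u.reg .r15
  s2 : UInt64.ofNat (m.readLE (u.reg .rsp - 16) 8) = u.reg .r14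
  s3 : UInt64.ofNat (m.readLE (u.reg .rsp - 24) 8) = u.reg .r13
  s4 : UInt64.ofNat (m.readLE (u.reg .rsp - 32) 8) = u.reg .r12
  s5 : UInt64.ofNat (m.readLE (u.reg .rsp - 40) 8) = u.reg .rbp
  s6 : UInt64.ofNat (m.readLE (u.reg .rsp - 48) 8) = u.reg .rbx
  s8 : UInt64.ofNat (m.readLE (u.reg .rsp - 64) 8) = cmp

/-- **The memory invariant over a call** (the push of the return address and whatever the callee does): the frame's slots
`[rsp − 64, rsp + 8)` are as before, nothing outside the footprint and no shadow byte was written, and the records are kept. -/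
theorem MemInv.step {u : State} {ret cmp : Word} {w : Nat} {m m' : Mem} (h : MemInv u ret cmp w m)
    (hroom : 7340032 + 176 ≤ (u.reg .rsp).toNat) (htop : (u.reg .rsp).toNat + 8 ≤ 8388608)
    (hst : Mem.EqOn ((u.reg .rsp).toNat - 64) ((u.reg .rsp).toNat + 8) m m')
    (hsame : Mem.SameExcept [⟨(u.reg .rsp).toNat - 176, (u.reg .rsp).toNat⟩,
      ⟨(u.reg .rdi).toNat, (u.reg .rdi).toNat + w * (u.reg .rdx).toNat⟩] m m')
    (hun : ShadowUntouched m m')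
    (hrk : RecordsKept m m' (u.reg .rdi).toNat w (u.reg .rdx).toNat) : MemInv u ret cmp w m' := by
  refine ⟨h.same.trans hsame, Mem.EqOn.trans h.un hun, h.rk.trans hrk, ?_, ?_, ?_, ?_, ?_, ?_, ?_, ?_⟩
  · exact Mem.ofNat_readLE_frame h.s0 (hst.mono (by u_omega) (by u_omega)) (by u_omega)
  · exact Mem.ofNat_readLE_frame h.s1 (hst.mono (by u_omega) (by u_omega)) (by u_omega)
  · exact Mem.ofNat_readLE_frame h.s2 (hst.mono (by u_omega) (by u_omega)) (by u_omega)
  · exact Mem.ofNat_readLE_frame h.s3 (hst.mono (by u_omega) (by u_omega)) (by u_omega)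
  · exact Mem.ofNat_readLE_frame h.s4 (hst.mono (by u_omega) (by u_omega)) (by u_omega)
  · exact Mem.ofNat_readLE_frame h.s5 (hst.mono (by u_omega) (by u_omega)) (by u_omega)
  · exact Mem.ofNat_readLE_frame h.s6 (hst.mono (by u_omega) (by u_omega)) (by u_omega)
  · exact Mem.ofNat_readLE_frame h.s8 (hst.mono (by u_omega) (by u_omega)) (by u_omega)

/-- **The state at `cmpSite`** (0x101321): `root = i` in rbx, the chosen `child = c` in r12, the frame as at the loop head; rbp,
the flags and the caller-saved registers are whatever the paths left. -/
structure AtCmp (u₀ u : State) (ret cmp : Word) (w i c : Nat) (v : State) : Prop where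
  rip : v.rip = cmpSite
  rbx : v.reg .rbx = UInt64.ofNat i
  r12 : v.reg .r12 = UInt64.ofNat c
  r13 : v.reg .r13 = u.reg .rcx
  r14 : v.reg .r14 = u.reg .rdi
  r15 : v.reg .r15 = u.reg .rdx
  rsp : v.reg .rsp = u.reg .rsp - 72
  kept : RegsKept [.rbx, .rbp, .r12, .r13, .r14, .r15, .rsp, .rax, .rcx, .rdx, .rsi, .rdi, .r8, .r9, .r10, .r11,
    .r16, .r17, .r18, .r19, .r20, .r21, .r22, .r23, .r24, .r25, .r26, .r27, .r28, .r29, .r30, .r31] u v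
  mem : MemInv u ret cmp w v.mem
  df : v.flags .df = false
  mxcsr : v.mxcsr &&& 0x1F80 = 0x1F80
  eq : Mem.EqOn L.textLo L.textHi u₀.mem v.mem

end Vorbis.Spec.sift_down
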